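-- pv_equiv track=rewrite | github.com/chungwwei/cp-qs | round_a_2021/B.py | dfs
-- ===== SOURCE A (Python) =====
-- def dfs(i, j, dir, R, C, A):
--     if 0 <= i < R and 0 <= j < C and A[i][j] == 1:
--         if dir == 'right':
--             return 1 + dfs(i + 1, j, dir, R, C, A)
--         elif dir == 'left':
--             return 1 + dfs(i - 1, j, dir, R, C, A)
--         elif dir == 'up':
--             return 1 + dfs(i, j + 1, dir, R, C, A)
--         elif dir == 'down':
--             return 1 + dfs(i, j - 1, dir, R, C, A)
--     return 0
-- ===== SOURCE B (Python) =====
-- def dfs(i, j, dir, R, C, A):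
--     steps = {'right': (1, 0), 'left': (-1, 0), 'up': (0, 1), 'down': (0, -1)}
--     if dir not in steps or not (0 <= i < R and 0 <= j < C):
--         return 0
--     di, dj = steps[dir]
--     n = R - i if di == 1 else (i + 1 if di == -1 else (C - j if dj == 1 else j + 1))
--     ray = [A[i + di * k][j + dj * k] for k in range(n)]
--     count = 0
--     for v in ray:
--         if v != 1:
--             break
--         count += 1
--     return count
-- ===== Notes on version B (the rewrite author's own statement) =====
-- stated objective: alternative
-- what changed: Replaces the per-cell recursive walk by mapping dir to a step vector, materialising the in-grid ray of cell values as a list, and returning the length of its leading run of 1s.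
-- outside the precondition, e.g. on dfs(0, 0, 'right', 2, 1, [[0]]): A returns 0, B raises IndexError; on dfs(1, 0, 'right', 2, 1, [[1]]): A raises IndexError, B raises IndexError
import Mathlib
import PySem

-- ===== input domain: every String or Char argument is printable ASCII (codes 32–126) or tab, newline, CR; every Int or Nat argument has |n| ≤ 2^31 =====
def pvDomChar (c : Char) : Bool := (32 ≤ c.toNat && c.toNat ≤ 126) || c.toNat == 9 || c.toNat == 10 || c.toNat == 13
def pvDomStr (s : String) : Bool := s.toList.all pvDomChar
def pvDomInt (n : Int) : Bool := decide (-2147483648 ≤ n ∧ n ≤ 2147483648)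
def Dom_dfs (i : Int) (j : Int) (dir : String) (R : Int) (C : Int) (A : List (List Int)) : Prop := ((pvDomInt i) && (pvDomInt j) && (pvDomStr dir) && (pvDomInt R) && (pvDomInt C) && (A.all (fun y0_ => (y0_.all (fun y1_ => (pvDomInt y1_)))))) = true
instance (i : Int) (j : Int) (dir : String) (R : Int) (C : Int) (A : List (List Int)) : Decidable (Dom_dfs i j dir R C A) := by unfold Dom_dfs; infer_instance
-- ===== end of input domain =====

-- B replaces A's per-cell recursive walk by a step-vector + materialised ray whose leading run of 1s is counted; return value only, no mutation.

-- shared faithful access A[i][j], totalised with getD 0 (Pre_ guarantees in-range wherever either Python actually indexes)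
def cellAt (A : List (List Int)) (x y : Int) : Int :=
  ((PySem.List.pyGet? A x).bind (fun row => PySem.List.pyGet? row y)).getD 0

-- ===== PORT A =====
def dfs (i : Int) (j : Int) (dir : String) (R : Int) (C : Int) (A : List (List Int)) : Int :=
  if 0 ≤ i ∧ i < R ∧ 0 ≤ j ∧ j < C ∧ cellAt A i j = 1 then
    if dir == "right" then 1 + dfs (i + 1) j dir R C A
    else if dir == "left" then 1 + dfs (i - 1) j dir R C A
    else if dir == "up" then 1 + dfs i (j + 1) dir R C A
    else if dir == "down" then 1 + dfs i (j - 1) dir R C A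
    else 0
  else 0
termination_by (if dir == "right" then (R - i).toNat else if dir == "left" then (i + 1).toNat
  else if dir == "up" then (C - j).toNat else (j + 1).toNat)
decreasing_by all_goals simp_all

-- ===== PORT B =====
-- leading-run count: the 'for v in ray: if v != 1: break; count += 1' loop
def leadOnes : List Int → Int
  | [] => 0
  | v :: rest => if v ≠ 1 then 0 else 1 + leadOnes rest

def dfs_alt (i : Int) (j : Int) (dir : String) (R : Int) (C : Int) (A : List (List Int)) : Int :=
  -- steps = {'right':(1,0),'left':(-1,0),'up':(0,1),'down':(0,-1)}; 'dir not in steps' + lookup = one get?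
  match PySem.Dict.get? (PySem.Dict.ofList
      [("right", ((1 : Int), (0 : Int))), ("left", (-1, 0)), ("up", (0, 1)), ("down", (0, -1))]) dir with
  | none => 0
  | some (di, dj) =>
    if ¬(0 ≤ i ∧ i < R ∧ 0 ≤ j ∧ j < C) then 0
    else
      let n : Int := if di = 1 then R - i else if di = -1 then i + 1 else if dj = 1 then C - j else j + 1
      let ray : List Int := (PySem.List.pyRange 0 n 1).map (fun k => cellAt A (i + di * k) (j + dj * k))
      leadOnes ray

-- ===== PRECONDITION & SPEC =====
-- Pre_ excludes grids whose shape disagrees with R×C while (i,j) starts in bounds: there the walk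
-- can index a missing row/cell, so A raises IndexError mid-walk or returns 0 only because it stops
-- before the missing cell, while B's materialised ray itself raises IndexError.
def Pre_dfs (i : Int) (j : Int) (dir : String) (R : Int) (C : Int) (A : List (List Int)) : Prop :=
  (R ≤ (A.length : Int) ∧ ∀ row ∈ A, C ≤ (row.length : Int)) ∨ ¬(0 ≤ i ∧ i < R ∧ 0 ≤ j ∧ j < C)
instance (i : Int) (j : Int) (dir : String) (R : Int) (C : Int) (A : List (List Int)) : Decidable (Pre_dfs i j dir R C A) := by unfold Pre_dfs; infer_instance
def pvWitness_dfs : Int × Int × String × Int × Int × List (List Int) := (0, 1, "up", 2, 3, [[1, 1, 0], [1, 0, 1]])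

def Spec_dfs (i : Int) (j : Int) (dir : String) (R : Int) (C : Int) (A : List (List Int)) (out : Int) : Prop := out = dfs_alt i j dir R C A
instance (i : Int) (j : Int) (dir : String) (R : Int) (C : Int) (A : List (List Int)) (out : Int) : Decidable (Spec_dfs i j dir R C A out) := by unfold Spec_dfs; infer_instance

-- ===== CLAIM (what is proved, stated in full; the proofs are below) =====
def Claim_equal_dfs : Prop := ∀ (i : Int) (j : Int) (dir : String) (R : Int) (C : Int) (A : List (List Int)), Dom_dfs i j dir R C A → Pre_dfs i j dir R C A → Spec_dfs i j dir R C A (dfs i j dir R C A)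

-- ===== LEMMAS AND PROOFS =====

lemma leadOnes_map_range_succ (m : Nat) (f : Nat → Int) :
    leadOnes ((List.range (m + 1)).map f) =
      if f 0 ≠ 1 then 0 else 1 + leadOnes ((List.range m).map (fun k => f (k + 1))) := by
  rw [List.range_succ_eq_map]
  simp [leadOnes, List.map_map, Function.comp_def]

lemma dfs_out_of_bounds (i j : Int) (dir : String) (R C : Int) (A : List (List Int))
    (h : ¬(0 ≤ i ∧ i < R ∧ 0 ≤ j ∧ j < C)) : dfs i j dir R C A = 0 := by
  rw [dfs]; rw [if_neg (by tauto)]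

lemma dfs_unknown (i j : Int) (dir : String) (R C : Int) (A : List (List Int))
    (h1 : dir ≠ "right") (h2 : dir ≠ "left") (h3 : dir ≠ "up") (h4 : dir ≠ "down") :
    dfs i j dir R C A = 0 := by
  rw [dfs]
  simp [h1, h2, h3, h4]

lemma ray_eq (i j di dj : Int) (n : Int) (A : List (List Int)) :
    (PySem.List.pyRange 0 n 1).map (fun k => cellAt A (i + di * k) (j + dj * k)) =
      (List.range n.toNat).map (fun k : Nat => cellAt A (i + di * k) (j + dj * k)) := by
  rw [PySem.List.pyRange_one]
  simp [List.map_map, Function.comp_def]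

lemma run_right (m : Nat) : ∀ (i j R C : Int) (A : List (List Int)),
    (R - i).toNat = m → 0 ≤ i → 0 ≤ j → j < C →
    dfs i j "right" R C A = leadOnes ((List.range m).map (fun k : Nat => cellAt A (i + k) j)) := by
  induction m with
  | zero =>
    intro i j R C A hm hi hj hjC
    rw [dfs_out_of_bounds i j "right" R C A (by omega)]
    simp [leadOnes]
  | succ m ih =>
    intro i j R C A hm hi hj hjC
    have hiR : i < R := by omega
    rw [leadOnes_map_range_succ]
    simp only [Nat.cast_zero, add_zero, Nat.cast_add, Nat.cast_one]
    by_cases hc : cellAt A i j = 1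
    · rw [dfs, if_pos (show 0 ≤ i ∧ i < R ∧ 0 ≤ j ∧ j < C ∧ cellAt A i j = 1 from
        ⟨hi, hiR, hj, hjC, hc⟩)]
      rw [if_pos (show ("right" == "right") = true from rfl)]
      rw [if_neg (not_not_intro hc)]
      rw [ih (i + 1) j R C A (by omega) (by omega) hj hjC]
      congr 1
      congr 1
      apply List.map_congr_left
      intro k _
      congr 1
      ring
    · rw [dfs, if_neg (fun h => hc h.2.2.2.2), if_pos hc]

lemma run_left (m : Nat) : ∀ (i j R C : Int) (A : List (List Int)),
    (i + 1).toNat = m → i < R → 0 ≤ j → j < C →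
    dfs i j "left" R C A = leadOnes ((List.range m).map (fun k : Nat => cellAt A (i - k) j)) := by
  induction m with
  | zero =>
    intro i j R C A hm hiR hj hjC
    rw [dfs_out_of_bounds i j "left" R C A (by omega)]
    simp [leadOnes]
  | succ m ih =>
    intro i j R C A hm hiR hj hjC
    have hi : 0 ≤ i := by omega
    rw [leadOnes_map_range_succ]
    simp only [Nat.cast_zero, sub_zero, Nat.cast_add, Nat.cast_one]
    by_cases hc : cellAt A i j = 1
    · rw [dfs, if_pos (show 0 ≤ i ∧ i < R ∧ 0 ≤ j ∧ j < C ∧ cellAt A i j = 1 from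
        ⟨hi, hiR, hj, hjC, hc⟩)]
      rw [if_neg (show ¬(("left" == "right") = true) by decide)]
      rw [if_pos (show ("left" == "left") = true from rfl)]
      rw [if_neg (not_not_intro hc)]
      rw [ih (i - 1) j R C A (by omega) (by omega) hj hjC]
      congr 1
      congr 1
      apply List.map_congr_left
      intro k _
      congr 1
      ring
    · rw [dfs, if_neg (fun h => hc h.2.2.2.2), if_pos hc]

lemma run_up (m : Nat) : ∀ (i j R C : Int) (A : List (List Int)),
    (C - j).toNat = m → 0 ≤ i → i < R → 0 ≤ j →
    dfs i j "up" R C A = leadOnes ((List.range m).map (fun k : Nat => cellAt A i (j + k))) := by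
  induction m with
  | zero =>
    intro i j R C A hm hi hiR hj
    rw [dfs_out_of_bounds i j "up" R C A (by omega)]
    simp [leadOnes]
  | succ m ih =>
    intro i j R C A hm hi hiR hj
    have hjC : j < C := by omega
    rw [leadOnes_map_range_succ]
    simp only [Nat.cast_zero, add_zero, Nat.cast_add, Nat.cast_one]
    by_cases hc : cellAt A i j = 1
    · rw [dfs, if_pos (show 0 ≤ i ∧ i < R ∧ 0 ≤ j ∧ j < C ∧ cellAt A i j = 1 from
        ⟨hi, hiR, hj, hjC, hc⟩)]
      rw [if_neg (show ¬(("up" == "right") = true) by decide)]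
      rw [if_neg (show ¬(("up" == "left") = true) by decide)]
      rw [if_pos (show ("up" == "up") = true from rfl)]
      rw [if_neg (not_not_intro hc)]
      rw [ih i (j + 1) R C A (by omega) hi hiR (by omega)]
      congr 1
      congr 1
      apply List.map_congr_left
      intro k _
      congr 1
      ring
    · rw [dfs, if_neg (fun h => hc h.2.2.2.2), if_pos hc]

lemma run_down (m : Nat) : ∀ (i j R C : Int) (A : List (List Int)),
    (j + 1).toNat = m → 0 ≤ i → i < R → j < C →
    dfs i j "down" R C A = leadOnes ((List.range m).map (fun k : Nat => cellAt A i (j - k))) := by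
  induction m with
  | zero =>
    intro i j R C A hm hi hiR hjC
    rw [dfs_out_of_bounds i j "down" R C A (by omega)]
    simp [leadOnes]
  | succ m ih =>
    intro i j R C A hm hi hiR hjC
    have hj : 0 ≤ j := by omega
    rw [leadOnes_map_range_succ]
    simp only [Nat.cast_zero, sub_zero, Nat.cast_add, Nat.cast_one]
    by_cases hc : cellAt A i j = 1
    · rw [dfs, if_pos (show 0 ≤ i ∧ i < R ∧ 0 ≤ j ∧ j < C ∧ cellAt A i j = 1 from
        ⟨hi, hiR, hj, hjC, hc⟩)]
      rw [if_neg (show ¬(("down" == "right") = true) by decide)]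
      rw [if_neg (show ¬(("down" == "left") = true) by decide)]
      rw [if_neg (show ¬(("down" == "up") = true) by decide)]
      rw [if_pos (show ("down" == "down") = true from rfl)]
      rw [if_neg (not_not_intro hc)]
      rw [ih i (j - 1) R C A (by omega) hi hiR (by omega)]
      congr 1
      congr 1
      apply List.map_congr_left
      intro k _
      congr 1
      ring
    · rw [dfs, if_neg (fun h => hc h.2.2.2.2), if_pos hc]

-- ===== VERDICT (by name: the statement is the Claim_ definition above) =====
theorem dfs_spec : Claim_equal_dfs := by
  intro i j dir R C A _ _
  unfold Spec_dfs dfs_alt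
  by_cases hb : 0 ≤ i ∧ i < R ∧ 0 ≤ j ∧ j < C
  case neg =>
    rw [dfs_out_of_bounds i j dir R C A hb]
    rcases PySem.Dict.get? (PySem.Dict.ofList
        [("right", ((1 : Int), (0 : Int))), ("left", (-1, 0)), ("up", (0, 1)), ("down", (0, -1))])
        dir with _ | ⟨di, dj⟩
    · rfl
    · dsimp only
      rw [if_pos hb]
  case pos =>
    obtain ⟨hi, hiR, hj, hjC⟩ := hb
    by_cases h1 : dir = "right"
    · subst h1
      rw [show PySem.Dict.get? (PySem.Dict.ofList
          [("right", ((1 : Int), (0 : Int))), ("left", (-1, 0)), ("up", (0, 1)), ("down", (0, -1))])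
          "right" = some (1, 0) from by decide]
      dsimp only
      rw [if_neg (not_not_intro (⟨hi, hiR, hj, hjC⟩ : 0 ≤ i ∧ i < R ∧ 0 ≤ j ∧ j < C))]
      rw [if_pos (rfl : (1 : Int) = 1), ray_eq]
      simp only [one_mul, zero_mul, add_zero]
      exact run_right (R - i).toNat i j R C A rfl hi hj hjC
    by_cases h2 : dir = "left"
    · subst h2
      rw [show PySem.Dict.get? (PySem.Dict.ofList
          [("right", ((1 : Int), (0 : Int))), ("left", (-1, 0)), ("up", (0, 1)), ("down", (0, -1))])
          "left" = some (-1, 0) from by decide]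
      dsimp only
      rw [if_neg (not_not_intro (⟨hi, hiR, hj, hjC⟩ : 0 ≤ i ∧ i < R ∧ 0 ≤ j ∧ j < C))]
      rw [if_neg (by decide : ¬((-1 : Int) = 1)), if_pos (rfl : (-1 : Int) = -1), ray_eq]
      simp only [neg_one_mul, zero_mul, add_zero, ← sub_eq_add_neg]
      exact run_left (i + 1).toNat i j R C A rfl hiR hj hjC
    by_cases h3 : dir = "up"
    · subst h3
      rw [show PySem.Dict.get? (PySem.Dict.ofList
          [("right", ((1 : Int), (0 : Int))), ("left", (-1, 0)), ("up", (0, 1)), ("down", (0, -1))])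
          "up" = some (0, 1) from by decide]
      dsimp only
      rw [if_neg (not_not_intro (⟨hi, hiR, hj, hjC⟩ : 0 ≤ i ∧ i < R ∧ 0 ≤ j ∧ j < C))]
      rw [if_neg (by decide : ¬((0 : Int) = 1)), if_neg (by decide : ¬((0 : Int) = -1)),
        if_pos (rfl : (1 : Int) = 1)]
      rw [ray_eq]
      simp only [zero_mul, one_mul, add_zero]
      exact run_up (C - j).toNat i j R C A rfl hi hiR hj
    by_cases h4 : dir = "down"
    · subst h4
      rw [show PySem.Dict.get? (PySem.Dict.ofList
          [("right", ((1 : Int), (0 : Int))), ("left", (-1, 0)), ("up", (0, 1)), ("down", (0, -1))])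
          "down" = some (0, -1) from by decide]
      dsimp only
      rw [if_neg (not_not_intro (⟨hi, hiR, hj, hjC⟩ : 0 ≤ i ∧ i < R ∧ 0 ≤ j ∧ j < C))]
      rw [if_neg (by decide : ¬((0 : Int) = 1)), if_neg (by decide : ¬((0 : Int) = -1)),
        if_neg (by decide : ¬((-1 : Int) = 1))]
      rw [ray_eq]
      simp only [zero_mul, neg_one_mul, add_zero, ← sub_eq_add_neg]
      exact run_down (j + 1).toNat i j R C A rfl hi hiR hjC
    · rw [dfs_unknown i j dir R C A h1 h2 h3 h4]
      rw [show PySem.Dict.get? (PySem.Dict.ofList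
          [("right", ((1 : Int), (0 : Int))), ("left", (-1, 0)), ("up", (0, 1)), ("down", (0, -1))])
          dir = none from by
        rw [PySem.Dict.get?_eq_none_iff_not_mem_keys]
        rw [show (PySem.Dict.ofList [("right", ((1 : Int), (0 : Int))), ("left", (-1, 0)),
          ("up", (0, 1)), ("down", (0, -1))]).keys = ["right", "left", "up", "down"] from by decide]
        simp [h1, h2, h3, h4]]
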